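-- pv_equiv track=rewrite | github.com/elkins/analysis | src/python/ccpn/ui/gui/lib/OpenGL/CcpnOpenGL.py | _buildSingleWildCard
-- ===== SOURCE A (Python) =====
-- def _buildSingleWildCard(_axisCodes):
--     """Buld the axisCode appending wildcard as required
--     """
--     _code = ''
--     if _axisCodes:
--         _maxLen = max(len(ax) for ax in _axisCodes)
--         _chs = [a for a in zip(*_axisCodes)]
--         for ch in _chs:
--             chSet = set(ch)
--             if len(chSet) == 1:
--                 _code += ch[0]
--             else:
--                 _code += '*'
--                 break
--         else:
--             if len(_code) < _maxLen:
--                 _code += '*'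
--     _code = _code or '*'
--
--     return _code
-- ===== SOURCE B (Python) =====
-- def _commonPrefix(a, b):
--     k = 0
--     while k < len(a) and k < len(b) and a[k] == b[k]:
--         k += 1
--     return a[:k]
--
--
-- def _buildSingleWildCard(_axisCodes):
--     """Build the axisCode appending wildcard as required."""
--     codes = list(_axisCodes)
--     if not codes:
--         return '*'
--     prefix = codes[0]
--     for s in codes[1:]:
--         prefix = _commonPrefix(prefix, s)
--     if len(prefix) == max(len(s) for s in codes):
--         return prefix or '*'
--     return prefix + '*'
-- ===== Notes on version B (the rewrite author's own statement) =====
-- stated objective: simpler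
-- what changed: A transposes the strings into columns and scans each column with a set-cardinality test and an early break plus a for-else length fixup; B instead folds a pairwise common-prefix over the list of strings and decides the wildcard once by comparing the prefix length with the maximum string length.
import Mathlib
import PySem

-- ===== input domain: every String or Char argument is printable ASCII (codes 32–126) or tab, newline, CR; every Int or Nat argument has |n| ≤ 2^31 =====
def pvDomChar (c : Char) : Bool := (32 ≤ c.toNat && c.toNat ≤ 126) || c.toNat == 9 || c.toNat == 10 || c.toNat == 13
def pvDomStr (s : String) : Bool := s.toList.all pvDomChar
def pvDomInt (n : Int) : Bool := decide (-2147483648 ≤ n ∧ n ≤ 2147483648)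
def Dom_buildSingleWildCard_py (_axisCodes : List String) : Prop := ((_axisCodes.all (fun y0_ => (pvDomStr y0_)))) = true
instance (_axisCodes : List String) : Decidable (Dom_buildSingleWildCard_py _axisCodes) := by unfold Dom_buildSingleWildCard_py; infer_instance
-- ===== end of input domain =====

-- B replaces A's column-by-column scan (transpose + set test + break + for-else fixup) by a fold of a
-- pairwise common-prefix over the strings followed by one length comparison; same cost, plainer code.

-- ===== PORT A =====
-- zip(*_axisCodes): the list of columns, one per index below the minimum length
-- (getD is exact here: every index taken is below each list's length).
def pvZipStar (xss : List (List Char)) : List (List Char) :=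
  let m := ((xss.map List.length).min?).getD 0
  (List.range m).map (fun i => xss.map (fun l => l.getD i ' '))

-- the 'for ch in _chs' loop: returns (accumulated _code, whether the loop hit 'break')
def pvLoopA (code : List Char) : List (List Char) → List Char × Bool
  | [] => (code, false)
  | ch :: rest =>
      if (PySem.Set.ofList ch).length = 1 then
        pvLoopA (code ++ [ch.headD ' ']) rest
      else (code ++ ['*'], true)

def buildSingleWildCard_py (_axisCodes : List String) : String :=
  let code : List Char :=
    match _axisCodes with
    | [] => []
    | x :: xs =>
      let maxLen := (((x :: xs).map (fun ax => ax.toList.length)).max?).getD 0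
      let chs := pvZipStar ((x :: xs).map String.toList)
      let r := pvLoopA [] chs
      if r.2 = false ∧ r.1.length < maxLen then r.1 ++ ['*'] else r.1
  String.ofList (if code = [] then ['*'] else code)

-- ===== PORT B =====
-- _commonPrefix(a, b): the while loop, as the obvious structural recursion over the two strings
def pvCommonPrefix : List Char → List Char → List Char
  | a :: as, b :: bs => if a = b then a :: pvCommonPrefix as bs else []
  | _, _ => []

def buildSingleWildCard_py_alt (_axisCodes : List String) : String :=
  match _axisCodes with
  | [] => "*"
  | c :: cs =>
    let pre := cs.foldl (fun p s => pvCommonPrefix p s.toList) c.toList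
    if pre.length = (((c :: cs).map (fun s => s.toList.length)).max?).getD 0 then
      (if pre = [] then "*" else String.ofList pre)
    else String.ofList (pre ++ ['*'])

-- ===== PRECONDITION & SPEC =====
def Spec_buildSingleWildCard_py (_axisCodes : List String) (out : String) : Prop := out = buildSingleWildCard_py_alt _axisCodes
instance (_axisCodes : List String) (out : String) : Decidable (Spec_buildSingleWildCard_py _axisCodes out) := by unfold Spec_buildSingleWildCard_py; infer_instance

-- ===== CLAIM (what is proved, stated in full; the proofs are below) =====
def Claim_equal_buildSingleWildCard_py : Prop := ∀ (_axisCodes : List String), Dom_buildSingleWildCard_py _axisCodes → Spec_buildSingleWildCard_py _axisCodes (buildSingleWildCard_py _axisCodes)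

-- ===== LEMMAS AND PROOFS =====

theorem pvCP_prefix_left (a b : List Char) : pvCommonPrefix a b <+: a := by
  induction a generalizing b with
  | nil => cases b <;> simp [pvCommonPrefix]
  | cons x xs ih =>
    cases b with
    | nil => simp [pvCommonPrefix]
    | cons y ys =>
      simp only [pvCommonPrefix]
      split
      · exact List.cons_prefix_cons.2 ⟨rfl, ih ys⟩
      · simp

theorem pvCP_prefix_right (a b : List Char) : pvCommonPrefix a b <+: b := by
  induction a generalizing b with
  | nil => cases b <;> simp [pvCommonPrefix]
  | cons x xs ih =>
    cases b with
    | nil => simp [pvCommonPrefix]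
    | cons y ys =>
      simp only [pvCommonPrefix]
      split
      · rename_i hxy; subst hxy; exact List.cons_prefix_cons.2 ⟨rfl, ih ys⟩
      · simp

theorem pvCP_greatest {q a b : List Char} (ha : q <+: a) (hb : q <+: b) :
    q <+: pvCommonPrefix a b := by
  induction q generalizing a b with
  | nil => simp
  | cons x xs ih =>
    obtain ⟨ta, rfl⟩ := ha
    obtain ⟨tb, hb⟩ := hb
    cases hb
    simp only [List.cons_append, pvCommonPrefix]
    exact List.cons_prefix_cons.2 ⟨rfl, ih ⟨ta, rfl⟩ ⟨tb, rfl⟩⟩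

-- the fold's result is a prefix of the accumulator and of every element folded in
theorem pvFold_prefix_acc (a : List Char) (ls : List (List Char)) :
    ls.foldl pvCommonPrefix a <+: a := by
  induction ls generalizing a with
  | nil => simp
  | cons l ls ih =>
    simp only [List.foldl_cons]
    exact (ih _).trans (pvCP_prefix_left a l)

theorem pvFold_prefix_mem (a : List Char) {ls : List (List Char)} {l : List Char}
    (h : l ∈ ls) : ls.foldl pvCommonPrefix a <+: l := by
  induction ls generalizing a with
  | nil => cases h
  | cons x xs ih =>
    simp only [List.foldl_cons]
    rcases List.mem_cons.1 h with rfl | h'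
    · exact (pvFold_prefix_acc _ xs).trans (pvCP_prefix_right a l)
    · exact ih _ h'

theorem pvFold_greatest {q a : List Char} {ls : List (List Char)}
    (ha : q <+: a) (h : ∀ l ∈ ls, q <+: l) : q <+: ls.foldl pvCommonPrefix a := by
  induction ls generalizing a with
  | nil => simpa using ha
  | cons x xs ih =>
    simp only [List.foldl_cons]
    exact ih (pvCP_greatest ha (h x (by simp))) (fun l hl => h l (by simp [hl]))

-- set(ch) has one element iff every element of the (nonempty) tuple equals its head
theorem pvFoldAdd_const (a : Char) (t : List Char) (h : ∀ x ∈ t, x = a) :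
    t.foldl PySem.Set.add [a] = [a] := by
  induction t with
  | nil => rfl
  | cons x t' ih =>
    have hx : x = a := h x (by simp)
    subst hx
    simp only [List.foldl_cons]
    have : PySem.Set.add [x] x = [x] := by simp [PySem.Set.add]
    rw [this]
    exact ih (fun y hy => h y (by simp [hy]))

theorem pvSet_len_one (a : Char) (t : List Char) :
    (PySem.Set.ofList (a :: t)).length = 1 ↔ ∀ x ∈ t, x = a := by
  constructor
  · intro h x hx
    obtain ⟨y, hy⟩ := List.length_eq_one_iff.1 h
    have ha : a ∈ PySem.Set.ofList (a :: t) := (PySem.Set.mem_ofList _ _).2 (by simp)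
    have hx' : x ∈ PySem.Set.ofList (a :: t) := (PySem.Set.mem_ofList _ _).2 (by simp [hx])
    rw [hy] at ha hx'
    simp at ha hx'
    rw [hx', ha]
  · intro h
    have : PySem.Set.ofList (a :: t) = [a] := by
      rw [PySem.Set.ofList_eq_foldl]
      simp only [List.foldl_cons]
      have h0 : PySem.Set.add [] a = [a] := by simp [PySem.Set.add]
      rw [h0]
      exact pvFoldAdd_const a t h
    rw [this]
    rfl

theorem pvPrefix_getD {p l : List Char} (h : p <+: l) {i : Nat} (hi : i < p.length) :
    l.getD i ' ' = p.getD i ' ' := by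
  obtain ⟨t, rfl⟩ := h
  rw [List.getD_eq_getElem?_getD, List.getD_eq_getElem?_getD,
      List.getElem?_append_left hi]

theorem pvLoopA_const (acc : List Char) (L : List (List Char))
    (h : ∀ ch ∈ L, (PySem.Set.ofList ch).length = 1) :
    pvLoopA acc L = (acc ++ L.map (·.headD ' '), false) := by
  induction L generalizing acc with
  | nil => simp [pvLoopA]
  | cons ch rest ih =>
    simp only [pvLoopA, if_pos (h ch (by simp))]
    rw [ih _ (fun c hc => h c (by simp [hc]))]
    simp

theorem pvLoopA_break (acc : List Char) (L1 : List (List Char)) (b : List Char)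
    (L2 : List (List Char)) (h1 : ∀ ch ∈ L1, (PySem.Set.ofList ch).length = 1)
    (hb : (PySem.Set.ofList b).length ≠ 1) :
    pvLoopA acc (L1 ++ b :: L2) = (acc ++ L1.map (·.headD ' ') ++ ['*'], true) := by
  induction L1 generalizing acc with
  | nil => simp [pvLoopA, hb]
  | cons ch rest ih =>
    simp only [List.cons_append, pvLoopA, if_pos (h1 ch (by simp))]
    rw [ih _ (fun c hc => h1 c (by simp [hc]))]
    simp


theorem pvMapRange_eq {P x : List Char} (h : P <+: x) :
    (List.range P.length).map (fun i => x.getD i ' ') = P := by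
  apply List.ext_getElem (by simp)
  intro i h1 h2
  simp only [List.getElem_map, List.getElem_range]
  rw [pvPrefix_getD h h2, List.getD_eq_getElem P ' ' h2]

-- characterization of A's loop on the columns of x :: ls, in terms of B's folded common prefix
theorem pvLoop_char (x : List Char) (ls : List (List Char)) :
    pvLoopA [] (pvZipStar (x :: ls)) =
      (if (ls.foldl pvCommonPrefix x).length < (((x :: ls).map List.length).min?).getD 0
       then (ls.foldl pvCommonPrefix x ++ ['*'], true)
       else (ls.foldl pvCommonPrefix x, false)) := by
  have hPx : ls.foldl pvCommonPrefix x <+: x := pvFold_prefix_acc x ls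
  have hPl : ∀ l ∈ ls, ls.foldl pvCommonPrefix x <+: l := fun l h => pvFold_prefix_mem x h
  set P := ls.foldl pvCommonPrefix x with hPdef
  set K := P.length with hKdef
  cases hmin : ((x :: ls).map List.length).min? with
  | none => simp at hmin
  | some m =>
    obtain ⟨hm_mem, hm_le⟩ := List.min?_eq_some_iff.1 hmin
    have hmle : ∀ l ∈ x :: ls, m ≤ l.length := by
      intro l hl; exact hm_le _ (List.mem_map_of_mem hl)
    have hKm : K ≤ m := by
      obtain ⟨l, hl, rfl⟩ := List.mem_map.1 hm_mem
      rcases List.mem_cons.1 hl with rfl | hl'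
      · exact List.IsPrefix.length_le hPx
      · exact List.IsPrefix.length_le (hPl _ hl')
    have hcolConst : ∀ i, i < K →
        (PySem.Set.ofList ((x :: ls).map (fun l => l.getD i ' '))).length = 1 := by
      intro i hi
      simp only [List.map_cons]
      refine (pvSet_len_one _ _).2 ?_
      intro y hy
      obtain ⟨l, hl, rfl⟩ := List.mem_map.1 hy
      rw [pvPrefix_getD (hPl l hl) hi, pvPrefix_getD hPx hi]
    have hzip : pvZipStar (x :: ls)
        = (List.range m).map (fun i => (x :: ls).map (fun l => l.getD i ' ')) := by
      simp only [pvZipStar, hmin, Option.getD_some]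
    have hheads : ∀ (R : List ℕ),
        ((R.map (fun i => (x :: ls).map (fun l => l.getD i ' '))).map (·.headD ' '))
          = R.map (fun i => x.getD i ' ') := by
      intro R; simp [List.map_map]
    by_cases hlt : K < m
    · -- a column below the minimum length diverges: the loop breaks at column K
      have hnot : ¬ ∀ y ∈ ls.map (fun l => l.getD K ' '), y = x.getD K ' ' := by
        intro hall
        have key : ∀ l ∈ x :: ls, x.take (K + 1) <+: l := by
          intro l hl
          have h1 : K + 1 ≤ l.length := le_trans (by omega) (hmle l hl)
          have h2 : K + 1 ≤ x.length := le_trans (by omega) (hmle x (by simp))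
          have heq : l.take (K + 1) = x.take (K + 1) := by
            apply List.ext_getElem (by rw [List.length_take, List.length_take]; omega)
            intro i hi1 hi2
            have hiK1 : i < K + 1 := by
              have h' := hi1
              simp only [List.length_take] at h'
              omega
            simp only [List.getElem_take]
            rcases Nat.lt_or_ge i K with hiK | hiK
            · have hx1 : x.getD i ' ' = P.getD i ' ' := pvPrefix_getD hPx hiK
              rcases List.mem_cons.1 hl with rfl | hl'
              · rfl
              · have hl1 : l.getD i ' ' = P.getD i ' ' := pvPrefix_getD (hPl l hl') hiK
                have hli := hl1.trans hx1.symm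
                rw [List.getD_eq_getElem l ' ' (by omega),
                    List.getD_eq_getElem x ' ' (by omega)] at hli
                exact hli
            · have hiK' : i = K := by omega
              subst hiK'
              rcases List.mem_cons.1 hl with rfl | hl'
              · rfl
              · have hli := hall _ (List.mem_map_of_mem hl')
                rw [List.getD_eq_getElem l ' ' (by omega),
                    List.getD_eq_getElem x ' ' (by omega)] at hli
                exact hli
          rw [← heq]
          exact List.take_prefix _ _
        have hQP : x.take (K + 1) <+: P :=
          pvFold_greatest (key x (by simp)) (fun l hl => key l (by simp [hl]))
        have hlen := List.IsPrefix.length_le hQP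
        rw [List.length_take] at hlen
        have h2 : K + 1 ≤ x.length := le_trans (by omega) (hmle x (by simp))
        omega
      have hbK : (PySem.Set.ofList ((x :: ls).map (fun l => l.getD K ' '))).length ≠ 1 := by
        simp only [List.map_cons]
        exact fun h1 => hnot ((pvSet_len_one _ _).1 h1)
      have hsplit : List.range m
          = List.range K ++ K :: (List.range (m - K - 1)).map (fun j => K + Nat.succ j) := by
        have h1 : m = K + (m - K - 1 + 1) := by omega
        rw [h1, List.range_add, List.range_succ_eq_map]
        simp [List.map_map]
      rw [hzip, hsplit, List.map_append, List.map_cons]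
      rw [pvLoopA_break _ _ _ _
            (by intro ch hch
                obtain ⟨i, hi, rfl⟩ := List.mem_map.1 hch
                exact hcolConst i (by simpa using hi))
            hbK]
      rw [hheads, pvMapRange_eq hPx]
      simp [hlt]
    · -- every column is constant: the loop runs to completion
      have hKm' : K = m := le_antisymm hKm (not_lt.1 hlt)
      rw [hzip, pvLoopA_const _ _
            (by intro ch hch
                obtain ⟨i, hi, rfl⟩ := List.mem_map.1 hch
                exact hcolConst i (by simpa [← hKm'] using hi))]
      rw [hheads, ← hKm', pvMapRange_eq hPx]
      simp


theorem pvMinLeMax (L : List ℕ) (hne : L ≠ []) : (L.min?).getD 0 ≤ (L.max?).getD 0 := by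
  cases hmin : L.min? with
  | none => exact absurd (List.min?_eq_none_iff.1 hmin) hne
  | some a =>
    cases hmax : L.max? with
    | none => rw [List.max?_eq_none_iff.1 hmax] at hmin; simp at hmin
    | some b =>
      obtain ⟨hma, _⟩ := List.min?_eq_some_iff.1 hmin
      obtain ⟨_, hlb⟩ := List.max?_eq_some_iff.1 hmax
      simpa using hlb a hma

theorem pvK_le_max (x : List Char) (ls : List (List Char)) :
    (ls.foldl pvCommonPrefix x).length ≤ (((x :: ls).map List.length).max?).getD 0 := by
  cases hmax : ((x :: ls).map List.length).max? with
  | none => simp at hmax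
  | some b =>
    obtain ⟨_, hlb⟩ := List.max?_eq_some_iff.1 hmax
    have h1 := List.IsPrefix.length_le (pvFold_prefix_acc x ls)
    have h2 := hlb x.length (by simp)
    simpa using le_trans h1 h2

-- ===== VERDICT (by name: the statement is the Claim_ definition above) =====
theorem buildSingleWildCard_py_spec : Claim_equal_buildSingleWildCard_py := by
  intro codes _
  unfold Spec_buildSingleWildCard_py
  cases codes with
  | nil => rfl
  | cons c cs =>
    simp only [buildSingleWildCard_py, buildSingleWildCard_py_alt]
    have hfold : cs.foldl (fun p s => pvCommonPrefix p s.toList) c.toList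
        = (cs.map String.toList).foldl pvCommonPrefix c.toList := List.foldl_map.symm
    have hmap : (c :: cs).map (fun s => s.toList.length)
        = ((c.toList :: cs.map String.toList).map List.length) := by
      rw [show (c.toList :: cs.map String.toList) = (c :: cs).map String.toList from rfl, List.map_map]
      rfl
    have hcons : (c :: cs).map String.toList = c.toList :: cs.map String.toList := rfl
    rw [hcons, pvLoop_char c.toList (cs.map String.toList), hfold, hmap]
    have h1 : ((cs.map String.toList).foldl pvCommonPrefix c.toList).length
        ≤ (((c.toList :: cs.map String.toList).map List.length).max?).getD 0 :=
      pvK_le_max c.toList (cs.map String.toList)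
    have h2 : (((c.toList :: cs.map String.toList).map List.length).min?).getD 0
        ≤ (((c.toList :: cs.map String.toList).map List.length).max?).getD 0 :=
      pvMinLeMax _ (by simp)
    set P := (cs.map String.toList).foldl pvCommonPrefix c.toList with hP
    set m := (((c.toList :: cs.map String.toList).map List.length).min?).getD 0 with hm
    set M := (((c.toList :: cs.map String.toList).map List.length).max?).getD 0 with hM
    by_cases hlt : P.length < m
    · have hne : ¬ P.length = M := by omega
      simp [hlt, hne]
    · by_cases hPM : P.length < M
      · have hne : ¬ P.length = M := by omega
        simp [hlt, hPM, hne]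
      · have hEq : P.length = M := by omega
        by_cases hPnil : P = []
        · have hM0 : M = 0 := by rw [hPnil] at hEq; simpa using hEq.symm
          have hm0 : m = 0 := by omega
          simp [hPnil, hm0, hM0]
        · simp [hPnil, hEq, show ¬ M < m from by omega]
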